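-- pv_equiv track=rewrite | github.com/Nikoloz8/GOA-Group---41 | Additionals (19&20)/Additionals_HW/5/5.py | remove_char
-- ===== SOURCE A (Python) =====
-- def remove_char(s):
--     string = "" #აქ ვქმნი string-ისთვის განკუთვნილ ცარიელ ცვლადს.
--     count = -1 #აქ ვქმნი count ცვლადს, რომელიც ქვევით დამჭირდება.
--     for i in range(len(s) - 2):#აქ ვქმნი ციკლს, რომელსაც range ში გადავცემ იმ რაოდენობას - 2, რა სიგრძისაც იქნება s ცვლადში მოთავსებული string.
--         count = count - 1  #ამ ციკლში კი ვათავსებ count ცვლადს, რომელსაც ყოველ გამეორებაზე ვაკლებ კიდევ 1-ს.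
--         string = string + s[count]#აქ ზემოთ შექმნილ sting ცვლადში ვათავსებ count ცვლადს, ბოლო ასოს გარეშე, ამასთან ერთად კი შემობრუნებულს.
--     unreverse_string = "" #აქ ვქმნი კიდევ ერთ ცვლადს, შემობრუნებული სტრინგის დასალაგებლად.
--     length = len(string)  #აქ ვქმნი length ცვლადს რომელიც არის string ცვლადში მოთავსებული string-ის ტოლი, იგი while loop-ისთვის არის საჭირო.
--     while length > 0: #აქ ვქმნი ციკლს, რომელიც განმეორდება მანამდე, სანამ string-ის სიგრძე იქნება 0-ზე მეტი.
--         length = length - 1 #აქ ციკლის ყოველ გამეორებაზე ვაკლებ სიგრძეს 1-ს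
--         unreverse_string = unreverse_string + string[length] #აქ შემობრუნებულ სტრინგს ვალაგებ სწორი თანმიმდევრობით.
--     return unreverse_string
-- ===== SOURCE B (Python) =====
-- def remove_char(s):
--     result = ""
--     for i in range(1, len(s) - 1):
--         result += s[i]
--     return result
-- ===== Notes on version B (the rewrite author's own statement) =====
-- stated objective: simpler
-- what changed: B builds the middle of the string in one forward pass over indices 1..len(s)-2, instead of A's backward accumulation of a reversed copy via negative indices followed by a second un-reversing while-loop; dropping the second loop and the reversal halves the character appends.
import Mathlib
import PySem

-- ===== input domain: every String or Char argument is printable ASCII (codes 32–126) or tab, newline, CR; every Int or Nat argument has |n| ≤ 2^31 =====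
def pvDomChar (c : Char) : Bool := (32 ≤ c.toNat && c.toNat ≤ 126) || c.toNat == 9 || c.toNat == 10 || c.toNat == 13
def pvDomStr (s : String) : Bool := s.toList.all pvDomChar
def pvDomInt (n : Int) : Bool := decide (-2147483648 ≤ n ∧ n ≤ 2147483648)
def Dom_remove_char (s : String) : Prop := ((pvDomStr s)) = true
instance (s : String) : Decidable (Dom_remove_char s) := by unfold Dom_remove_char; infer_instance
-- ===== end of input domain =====

-- B removes the first and last character in one forward pass; A builds a reversed
-- middle via negative indices and then un-reverses it with a second loop. Return
-- values agree on every input (both are total).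

-- ===== PORT A =====
-- while-loop over `length`: `length` starts at len(string) ≥ 0 and is decremented to 0,
-- so it is transliterated as structural recursion on that Nat.
def removeCharUnrev (string : List Char) (acc : List Char) : Nat → List Char
  | 0 => acc
  | Nat.succ k =>
      -- unreverse_string = unreverse_string + string[length]  (index k < len, default never used)
      removeCharUnrev string (acc ++ [PySem.List.pyGetD string (k : Int) ' ']) k

def remove_char (s : String) : String :=
  -- for i in range(len(s) - 2): count -= 1; string += s[count]
  let st := (PySem.List.pyRange 0 (PySem.Str.len s - 2) 1).foldl
    (fun (p : List Char × Int) _i =>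
      let count := p.2 - 1
      (p.1 ++ [PySem.List.pyGetD s.toList count ' '], count))   -- count always in range, default never used
    ([], -1)
  let string := st.1
  String.ofList (removeCharUnrev string [] string.length)

-- ===== PORT B =====
def remove_char_alt (s : String) : String :=
  -- for i in range(1, len(s) - 1): result += s[i]
  String.ofList ((PySem.List.pyRange 1 (PySem.Str.len s - 1) 1).foldl
    (fun (acc : List Char) i => acc ++ [PySem.List.pyGetD s.toList i ' ']) [])

-- ===== PRECONDITION & SPEC =====
def Spec_remove_char (s : String) (out : String) : Prop := out = remove_char_alt s
instance (s : String) (out : String) : Decidable (Spec_remove_char s out) := by unfold Spec_remove_char; infer_instance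

-- ===== CLAIM (what is proved, stated in full; the proofs are below) =====
def Claim_equal_remove_char : Prop := ∀ (s : String), Dom_remove_char s → Spec_remove_char s (remove_char s)

-- ===== LEMMAS AND PROOFS =====

-- A's for-loop ignores the range element: its first component is a map over positions.
lemma loopA_fst (xs : List Int) (l acc : List Char) (c : Int) :
    (xs.foldl
      (fun (p : List Char × Int) _i =>
        let count := p.2 - 1
        (p.1 ++ [PySem.List.pyGetD l count ' '], count)) (acc, c)).1
    = acc ++ (List.range xs.length).map (fun k : Nat => PySem.List.pyGetD l (c - 1 - (k : Int)) ' ') := by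
  induction xs generalizing acc c with
  | nil => simp
  | cons x xs ih =>
      have h : (List.range (xs.length + 1)).map
            (fun k : Nat => PySem.List.pyGetD l (c - 1 - (k : Int)) ' ')
          = PySem.List.pyGetD l (c - 1) ' ' :: (List.range xs.length).map
            (fun k : Nat => PySem.List.pyGetD l (c - 1 - 1 - (k : Int)) ' ') := by
        rw [List.range_succ_eq_map, List.map_cons, List.map_map]
        congr 1
        · norm_num
        · apply List.map_congr_left
          intro k _
          simp only [Function.comp_apply]
          congr 1
          push_cast
          ring
      rw [List.foldl_cons, ih, List.length_cons, h]
      simp [List.append_assoc]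

-- A's while-loop reverses (the first k elements of) `string`.
lemma unrev_eq (string acc : List Char) (k : Nat) (hk : k ≤ string.length) :
    removeCharUnrev string acc k = acc ++ (string.take k).reverse := by
  induction k generalizing acc with
  | zero => simp [removeCharUnrev]
  | succ k ih =>
      have hk' : k < string.length := hk
      rw [removeCharUnrev, ih _ (Nat.le_of_succ_le hk)]
      rw [PySem.List.pyGetD_eq_getElem string ' ' (by exact_mod_cast Nat.zero_le k)
        (by exact_mod_cast hk')]
      rw [List.take_add_one, List.getElem?_eq_getElem hk', List.reverse_append]
      simp

-- the reversed backward accumulation of A equals the forward middle of B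
lemma middle_reverse (l : List Char) (m : Nat) (hm : m = ((l.length : Int) - 2).toNat) :
    ((List.range m).map (fun k : Nat => PySem.List.pyGetD l (-1 - 1 - (k : Int)) ' ')).reverse
    = (List.range m).map (fun k : Nat => PySem.List.pyGetD l (1 + (k : Int)) ' ') := by
  apply List.ext_getElem
  · simp
  · intro j h1 h2
    simp only [List.getElem_reverse, List.getElem_map, List.getElem_range,
      List.length_reverse, List.length_map, List.length_range] at h1 h2 ⊢
    have hj : j < m := h2
    have hlen : m + 2 = l.length := by omega
    have e1 : (-1 - 1 - ((m - 1 - j : Nat) : Int)) = -(((m + 1 - j : Nat) : Int)) := by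
      push_cast [Nat.sub_sub]
      omega
    rw [e1, PySem.List.pyGetD_neg_natCast l (m + 1 - j) ' ' (by omega) (by omega)]
    rw [PySem.List.pyGetD_eq_getElem l ' ' (by omega) (by exact_mod_cast by omega : (1 + (j:Int)) < (l.length : Int))]
    have e2 : l.length - (m + 1 - j) = (1 + (j : Int)).toNat := by omega
    exact getElem_congr_idx e2

theorem remove_char_spec : Claim_equal_remove_char := by
  intro s _
  simp only [Spec_remove_char, remove_char, remove_char_alt]
  rw [loopA_fst, unrev_eq _ _ _ le_rfl, List.take_length,
    PySem.List.foldl_append_singleton_eq_map]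
  simp only [PySem.List.pyRange_one, List.map_map, List.length_map, List.length_range,
    PySem.Str.len_eq, List.nil_append, sub_zero, Function.comp_def, zero_add]
  rw [show ((s.toList.length : Int) - 1 - 1).toNat = ((s.toList.length : Int) - 2).toNat
      from by omega,
    middle_reverse s.toList _ rfl]

-- ===== VERDICT (by name: the statement is the Claim_ definition above) =====
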